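-- pv_equiv track=rewrite | github.com/ArianFR/git-lesson | quera-alghoritm1-pythonANS/lesson9/oghatfaraghat.py | search_vertical
-- ===== SOURCE A (Python) =====
-- def search_vertical(table, s):
--     count = 0
--     for j in range(len(table[0])):
--         for i in range(len(table) - len(s) + 1):
--             found = True
--             for k in range(len(s)):
--                 if table[i+k][j] != s[k]:
--                     found = False
--                     break
--             if found:
--                 count += 1
--     return count
-- ===== SOURCE B (Python) =====
-- def search_vertical(table, s):
--     pat = list(s)
--     m = len(pat)
--     count = 0
--     for j in range(len(table[0])):
--         col = [row[j] for row in table]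
--         count += sum(1 for i in range(len(col) - m + 1) if col[i:i + m] == pat)
--     return count
-- ===== Notes on version B (the rewrite author's own statement) =====
-- stated objective: alternative
-- what changed: Replaces the triple nested index loop with per-character break by a transpose: each column is extracted once as a list and overlapping occurrences are counted by comparing slices col[i:i+m] to list(s); Pre_ excludes empty tables (A raises IndexError on table[0]) and tables with a row shorter than the first row, where A raising or returning depends on where early mismatches break the scan and B's column extraction raises.
-- outside the precondition, e.g. on search_vertical([['a', 'b'], ['c']], 'zz'): A returns 0, B raises IndexError; on search_vertical([], 'a'): A raises IndexError, B raises IndexError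
import Mathlib
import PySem

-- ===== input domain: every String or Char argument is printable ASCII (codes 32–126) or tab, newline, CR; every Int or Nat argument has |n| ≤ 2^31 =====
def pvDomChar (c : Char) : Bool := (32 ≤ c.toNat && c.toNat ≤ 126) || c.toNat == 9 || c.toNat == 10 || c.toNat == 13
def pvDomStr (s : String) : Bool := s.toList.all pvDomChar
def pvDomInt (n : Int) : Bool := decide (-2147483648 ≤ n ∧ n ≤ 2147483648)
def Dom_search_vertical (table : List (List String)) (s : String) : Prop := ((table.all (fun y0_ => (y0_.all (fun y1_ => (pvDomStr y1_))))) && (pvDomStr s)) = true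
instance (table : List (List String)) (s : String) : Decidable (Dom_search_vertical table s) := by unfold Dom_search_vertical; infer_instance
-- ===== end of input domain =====

-- B replaces A's triple nested index loop (with per-character break) by a transpose:
-- each column is extracted once and overlapping occurrences are counted by slice comparison.
-- Same asymptotic cost; equivalence of the return value is proved on rectangular, nonempty tables.

-- ===== PORT A =====
-- inner 'for k in range(len(s)): if table[i+k][j] != s[k]: found = False; break'
-- (cells compared as lists of characters; string equality is preserved by .toList)
def pvFoundA (table : List (List String)) (sl : List Char) (j i : Int) : List Int → Bool
  | [] => true
  | k :: ks =>
    if (PySem.List.pyGetD (PySem.List.pyGetD table (i + k) []) j "").toList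
        = [PySem.List.pyGetD sl k ' '] then
      pvFoundA table sl j i ks
    else
      false

def search_vertical (table : List (List String)) (s : String) : Int :=
  let sl := s.toList
  (PySem.List.pyRange 0 ((PySem.List.pyGetD table 0 []).length : Int) 1).foldl
    (fun count j =>
      (PySem.List.pyRange 0 ((table.length : Int) - (sl.length : Int) + 1) 1).foldl
        (fun count i =>
          if pvFoundA table sl j i (PySem.List.pyRange 0 ((sl.length : Int)) 1) then
            count + 1
          else
            count)
        count)
    0

-- ===== PORT B =====
def search_vertical_alt (table : List (List String)) (s : String) : Int :=
  let pat : List (List Char) := s.toList.map (fun c => [c])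
  let m := pat.length
  (PySem.List.pyRange 0 ((PySem.List.pyGetD table 0 []).length : Int) 1).foldl
    (fun count j =>
      let col := table.map (fun row => (PySem.List.pyGetD row j "").toList)
      count +
        (PySem.List.pyRange 0 ((col.length : Int) - (m : Int) + 1) 1).foldl
          (fun acc i =>
            if PySem.List.slice col (some i) (some (i + (m : Int))) = pat then acc + 1 else acc)
          0)
    0

-- ===== PRECONDITION & SPEC =====
-- Pre_ excludes empty tables (A raises IndexError on table[0]) and tables with a row shorter
-- than the first row, where A raising or returning depends on where early mismatches break the
-- scan and B's column extraction raises.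
def Pre_search_vertical (table : List (List String)) (_s : String) : Prop :=
  table ≠ [] ∧ ∀ row ∈ table, (table.headD []).length ≤ row.length

instance (table : List (List String)) (s : String) : Decidable (Pre_search_vertical table s) := by
  unfold Pre_search_vertical; infer_instance

def pvWitness_search_vertical : List (List String) × String := ([["a"], ["a"]], "a")

def Spec_search_vertical (table : List (List String)) (s : String) (out : Int) : Prop := out = search_vertical_alt table s
instance (table : List (List String)) (s : String) (out : Int) : Decidable (Spec_search_vertical table s out) := by unfold Spec_search_vertical; infer_instance

-- ===== CLAIM (what is proved, stated in full; the proofs are below) =====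
def Claim_equal_search_vertical : Prop := ∀ (table : List (List String)) (s : String), Dom_search_vertical table s → Pre_search_vertical table s → Spec_search_vertical table s (search_vertical table s)

-- ===== LEMMAS AND PROOFS =====

lemma pvFoundA_eq_all (table : List (List String)) (sl : List Char) (j i : Int) (ks : List Int) :
    pvFoundA table sl j i ks =
      ks.all (fun k =>
        decide ((PySem.List.pyGetD (PySem.List.pyGetD table (i + k) []) j "").toList
          = [PySem.List.pyGetD sl k ' '])) := by
  induction ks with
  | nil => rfl
  | cons k ks ih =>
    simp only [pvFoundA, List.all_cons]
    split <;> simp_all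

lemma take_drop_eq_iff {α : Type} (col pat : List α) (n m : Nat)
    (_hlen : n + m ≤ col.length) (hpat : pat.length = m) :
    (col.drop n).take m = pat ↔ ∀ k, k < m → col[n + k]? = pat[k]? := by
  constructor
  · intro h k hk
    have := congrArg (fun l => l[k]?) h
    simpa [List.getElem?_take, hk, List.getElem?_drop] using this
  · intro h
    apply List.ext_getElem?
    intro k
    by_cases hk : k < m
    · simpa [List.getElem?_take, hk, List.getElem?_drop] using h k hk
    · have h1 : (List.take m (List.drop n col))[k]? = none := by
        rw [List.getElem?_eq_none_iff]
        simp [List.length_take]; omega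
      have h2 : pat[k]? = none := by
        rw [List.getElem?_eq_none_iff]; omega
      rw [h1, h2]

lemma found_iff (table : List (List String)) (sl : List Char) (j i : Int)
    (_hj : 0 ≤ j) (_hjlt : ∀ row ∈ table, j.toNat < row.length)
    (hi : 0 ≤ i) (him : i.toNat + sl.length ≤ table.length) :
    pvFoundA table sl j i (PySem.List.pyRange 0 ((sl.length : Int)) 1) =
      decide (PySem.List.slice (table.map (fun row => (PySem.List.pyGetD row j "").toList))
        (some i) (some (i + (sl.length : Int))) = sl.map (fun c => [c])) := by
  set f : List String → List Char := fun row => (PySem.List.pyGetD row j "").toList with hf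
  have hi' : i = (i.toNat : Int) := by omega
  rw [hi', PySem.List.slice_natCast_add]
  rw [pvFoundA_eq_all]
  have hcol : (table.map f).length = table.length := by simp
  rw [Bool.eq_iff_iff, List.all_eq_true, decide_eq_true_eq]
  rw [take_drop_eq_iff (table.map f) (sl.map fun c => [c]) i.toNat sl.length
      (by simpa using him) (by simp)]
  constructor
  · intro h k hk
    have hk' : ((k : Int)) ∈ PySem.List.pyRange 0 ((sl.length : Int)) 1 := by
      rw [PySem.List.mem_pyRange_one]; omega
    have := h _ hk'
    rw [decide_eq_true_eq] at this
    have hrow : i.toNat + k < table.length := by omega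
    have hcast : (i.toNat : Int) + (k : Int) = ((i.toNat + k : Nat) : Int) := by omega
    rw [hcast, PySem.List.pyGetD_natCast, PySem.List.pyGetD_natCast] at this
    rw [List.getD_eq_getElem _ _ hrow, List.getD_eq_getElem _ _ hk] at this
    simp only [List.getElem?_map]
    rw [List.getElem?_eq_getElem hrow, List.getElem?_eq_getElem hk]
    simp only [Option.map_some]
    have hjrow : table[i.toNat + k] ∈ table := List.getElem_mem hrow
    exact congrArg some this
  · intro h x hx
    rw [PySem.List.mem_pyRange_one] at hx
    obtain ⟨hx0, hxm⟩ := hx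
    lift x to ℕ using hx0 with k
    have hk : k < sl.length := by omega
    have := h k hk
    simp only [List.getElem?_map] at this
    have hrow : i.toNat + k < table.length := by omega
    rw [List.getElem?_eq_getElem hrow, List.getElem?_eq_getElem hk] at this
    simp only [Option.map_some, Option.some.injEq] at this
    rw [decide_eq_true_eq]
    have hcast : (i.toNat : Int) + (k : Int) = ((i.toNat + k : Nat) : Int) := by omega
    rw [hcast, PySem.List.pyGetD_natCast, PySem.List.pyGetD_natCast]
    rw [List.getD_eq_getElem _ _ hrow, List.getD_eq_getElem _ _ hk]
    exact this

lemma pyGetD_zero_headD (table : List (List String)) :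
    PySem.List.pyGetD table 0 [] = table.headD [] := by
  cases table <;> simp [PySem.List.pyGetD, PySem.List.pyGet?, PySem.List.pyIdx?]

-- ===== VERDICT (by name: the statement is the Claim_ definition above) =====
theorem search_vertical_spec : Claim_equal_search_vertical := by
  intro table s _hdom hpre
  obtain ⟨hne, hrect⟩ := hpre
  unfold Spec_search_vertical search_vertical search_vertical_alt
  simp only []
  apply PySem.List.foldl_congr_mem
  intro count j hjmem
  rw [PySem.List.mem_pyRange_one] at hjmem
  obtain ⟨hj0, hjlt⟩ := hjmem
  have hjrow : ∀ row ∈ table, j.toNat < row.length := by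
    intro row hrow
    have h1 := hrect row hrow
    rw [pyGetD_zero_headD] at hjlt
    omega
  rw [PySem.List.foldl_if_add_one, PySem.List.foldl_ite_add_one]
  have hlen : ((table.map (fun row => (PySem.List.pyGetD row j "").toList)).length : Int)
      - ((s.toList.map (fun c => [c])).length : Int) + 1
      = (table.length : Int) - (s.toList.length : Int) + 1 := by simp
  rw [hlen]
  have hcount : ∀ x ∈ PySem.List.pyRange 0 ((table.length : Int) - (s.toList.length : Int) + 1) 1,
      (fun i => pvFoundA table s.toList j i (PySem.List.pyRange 0 ((s.toList.length : Int)) 1)) x = true ↔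
      (fun i => decide (PySem.List.slice
          (table.map (fun row => (PySem.List.pyGetD row j "").toList))
          (some i) (some (i + ((s.toList.map (fun c => [c])).length : Int)))
          = s.toList.map (fun c => [c]))) x = true := by
    intro x hx
    rw [PySem.List.mem_pyRange_one] at hx
    obtain ⟨hx0, hxlt⟩ := hx
    simp only [List.length_map]
    rw [found_iff table s.toList j x hj0 hjrow hx0 (by omega)]
  rw [List.countP_congr hcount]
  omega
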